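-- pv_equiv track=rewrite | github.com/SparshSriva/zx_error_prop_tools | zx_error_prop/propagation.py | count_logical_errors
-- ===== SOURCE A (Python) =====
-- from typing import List, Tuple, Dict, Any
--
-- def count_logical_errors(
--     output_errors: Dict[int, str],
--     z_logicals: List[List[int]],
--     x_logicals: List[List[int]]
-- ) -> Tuple[int, int]:
--     """
--     Counts the number of logical Z and X errors.
--
--     A logical error occurs if a Pauli error string across the output qubits
--     anti-commutes with a logical operator. This is checked by seeing if the
--     error string crosses a logical line an odd number of times.
--
--     Args:
--         output_errors: A dictionary mapping output qubit indices to their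
--                        Pauli error ('X', 'Y', or 'Z').
--         z_logicals: A list of Z-type logical operators, where each operator is
--                     a list of qubit indices it acts on.
--         x_logicals: A list of X-type logical operators.
--
--     Returns:
--         A tuple containing (number_of_z_errors, number_of_x_errors).
--     """
--     num_z_errors = 0
--     num_x_errors = 0
--
--     # A Z-logical operator is triggered by an X or Y error.
--     for z_line in z_logicals:
--         z_crossings = 0
--         for qubit_idx in z_line:
--             if qubit_idx in output_errors and output_errors[qubit_idx] in ('X', 'Y'):
--                 z_crossings += 1
--         if z_crossings % 2 != 0:
--             num_z_errors += 1
--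
--     # An X-logical operator is triggered by a Z or Y error.
--     for x_line in x_logicals:
--         x_crossings = 0
--         for qubit_idx in x_line:
--             if qubit_idx in output_errors and output_errors[qubit_idx] in ('Z', 'Y'):
--                 x_crossings += 1
--         if x_crossings % 2 != 0:
--             num_x_errors += 1
--
--     return num_z_errors, num_x_errors
-- ===== SOURCE B (Python) =====
-- def count_logical_errors(output_errors, z_logicals, x_logicals):
--     # Errors-outer traversal: one pass over the error dict, maintaining a
--     # parity bit per logical line; a line's bit flips once per odd-multiplicity
--     # crossing qubit carrying an anticommuting Pauli.
--     z_par = [False] * len(z_logicals)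
--     x_par = [False] * len(x_logicals)
--     for qubit, pauli in output_errors.items():
--         if pauli in ('X', 'Y'):
--             z_par = [b ^ (line.count(qubit) % 2 == 1) for b, line in zip(z_par, z_logicals)]
--         if pauli in ('Z', 'Y'):
--             x_par = [b ^ (line.count(qubit) % 2 == 1) for b, line in zip(x_par, x_logicals)]
--     return sum(z_par), sum(x_par)
-- ===== Notes on version B (the rewrite author's own statement) =====
-- stated objective: alternative
-- what changed: Replaces A's lines-outer scan (recount crossings per logical line, dict lookup per qubit) by a single errors-outer pass over output_errors.items() that toggles one parity bit per logical line, counting set bits at the end.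
import Mathlib
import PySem

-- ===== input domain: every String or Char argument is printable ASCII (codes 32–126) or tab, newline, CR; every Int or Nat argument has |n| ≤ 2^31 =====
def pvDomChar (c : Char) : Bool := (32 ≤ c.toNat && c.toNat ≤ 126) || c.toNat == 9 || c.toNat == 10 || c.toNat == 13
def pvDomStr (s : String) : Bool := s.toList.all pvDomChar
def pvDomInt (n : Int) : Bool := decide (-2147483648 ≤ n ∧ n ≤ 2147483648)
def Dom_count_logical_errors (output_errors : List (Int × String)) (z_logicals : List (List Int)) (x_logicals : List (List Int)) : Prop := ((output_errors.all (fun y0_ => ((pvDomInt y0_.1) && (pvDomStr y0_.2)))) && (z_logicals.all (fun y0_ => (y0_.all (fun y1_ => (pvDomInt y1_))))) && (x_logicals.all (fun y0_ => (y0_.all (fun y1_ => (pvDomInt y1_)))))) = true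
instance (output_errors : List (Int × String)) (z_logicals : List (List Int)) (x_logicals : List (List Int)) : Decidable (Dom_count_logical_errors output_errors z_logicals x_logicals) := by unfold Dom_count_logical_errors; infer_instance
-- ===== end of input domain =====

-- B replaces A's lines-outer double scan by a single errors-outer pass that
-- maintains one parity bit per logical line (objective: alternative traversal).

-- ===== PORT A =====
-- `q in output_errors and output_errors[q] in (…)`: dict lookup (first match on the assoc list)
def pvHit (output_errors : List (Int × String)) (pa : String → Bool) (q : Int) : Bool :=
  match output_errors.lookup q with
  | some p => pa p
  | none => false

def count_logical_errors (output_errors : List (Int × String)) (z_logicals : List (List Int)) (x_logicals : List (List Int)) : Int × Int :=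
  let num_z := z_logicals.foldl (fun acc z_line =>
    let cr := z_line.foldl (fun c q =>
      if pvHit output_errors (fun p => p == "X" || p == "Y") q then c + 1 else c) (0 : Int)
    if PySem.Int.mod cr 2 ≠ 0 then acc + 1 else acc) (0 : Int)
  let num_x := x_logicals.foldl (fun acc x_line =>
    let cr := x_line.foldl (fun c q =>
      if pvHit output_errors (fun p => p == "Z" || p == "Y") q then c + 1 else c) (0 : Int)
    if PySem.Int.mod cr 2 ≠ 0 then acc + 1 else acc) (0 : Int)
  (num_z, num_x)

-- ===== PORT B =====
-- [b ^ (line.count(q) % 2 == 1) for b, line in zip(par, lines)]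
def pvToggle (q : Int) (par : List Bool) (lines : List (List Int)) : List Bool :=
  (par.zip lines).map (fun bl => xor bl.1 (bl.2.count q % 2 == 1))

def count_logical_errors_alt (output_errors : List (Int × String)) (z_logicals : List (List Int)) (x_logicals : List (List Int)) : Int × Int :=
  let st := output_errors.foldl (fun (st : List Bool × List Bool) e =>
      let zp := if e.2 == "X" || e.2 == "Y" then pvToggle e.1 st.1 z_logicals else st.1
      let xp := if e.2 == "Z" || e.2 == "Y" then pvToggle e.1 st.2 x_logicals else st.2
      (zp, xp))
    (List.replicate z_logicals.length false, List.replicate x_logicals.length false)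
  (((st.1.count true : Nat) : Int), ((st.2.count true : Nat) : Int))

-- ===== PRECONDITION & SPEC =====
-- Pre_ requires the qubit keys of output_errors to be pairwise distinct: the Python
-- argument is a dict, and an association list with duplicate keys encodes no dict
-- (A reads the first binding, B would process every item), so such lists lie
-- outside the function's domain.
def Pre_count_logical_errors (output_errors : List (Int × String)) (z_logicals : List (List Int)) (x_logicals : List (List Int)) : Prop :=
  (output_errors.map Prod.fst).Nodup

instance (output_errors : List (Int × String)) (z_logicals : List (List Int)) (x_logicals : List (List Int)) : Decidable (Pre_count_logical_errors output_errors z_logicals x_logicals) := by unfold Pre_count_logical_errors; infer_instance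

def pvWitness_count_logical_errors : (List (Int × String)) × List (List Int) × List (List Int) :=
  ([(0, "X"), (1, "Y"), (2, "Z")], [[0, 1], [2]], [[1, 2], [0, 0]])

def Spec_count_logical_errors (output_errors : List (Int × String)) (z_logicals : List (List Int)) (x_logicals : List (List Int)) (out : Int × Int) : Prop := out = count_logical_errors_alt output_errors z_logicals x_logicals
instance (output_errors : List (Int × String)) (z_logicals : List (List Int)) (x_logicals : List (List Int)) (out : Int × Int) : Decidable (Spec_count_logical_errors output_errors z_logicals x_logicals out) := by unfold Spec_count_logical_errors; infer_instance

-- ===== CLAIM (what is proved, stated in full; the proofs are below) =====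
def Claim_equal_count_logical_errors : Prop := ∀ (output_errors : List (Int × String)) (z_logicals : List (List Int)) (x_logicals : List (List Int)), Dom_count_logical_errors output_errors z_logicals x_logicals → Pre_count_logical_errors output_errors z_logicals x_logicals → Spec_count_logical_errors output_errors z_logicals x_logicals (count_logical_errors output_errors z_logicals x_logicals)

-- ===== LEMMAS AND PROOFS =====

-- parity of the number of crossings of `line` that carry a pa-Pauli error
def pvPar (output_errors : List (Int × String)) (pa : String → Bool) (line : List Int) : Bool :=
  line.countP (pvHit output_errors pa) % 2 == 1

theorem pvHit_cons (q : Int) (p : String) (rest : List (Int × String)) (pa : String → Bool) (x : Int) :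
    pvHit ((q, p) :: rest) pa x = if q = x then pa p else pvHit rest pa x := by
  unfold pvHit
  rw [List.lookup]
  by_cases h : q = x
  · subst h; simp
  · have hb : (x == q) = false := by simp; exact fun hh => h hh.symm
    simp [hb, h]

theorem pvHit_of_not_mem (rest : List (Int × String)) (pa : String → Bool) (q : Int)
    (hq : q ∉ rest.map Prod.fst) : pvHit rest pa q = false := by
  induction rest with
  | nil => rfl
  | cons e t ih =>
    obtain ⟨k, v⟩ := e
    simp only [List.map_cons, List.mem_cons] at hq
    push_neg at hq
    rw [pvHit_cons, if_neg (fun h => hq.1 h.symm)]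
    exact ih hq.2

theorem countP_hit_cons (q : Int) (p : String) (rest : List (Int × String)) (pa : String → Bool)
    (line : List Int) (hq : q ∉ rest.map Prod.fst) :
    line.countP (pvHit ((q, p) :: rest) pa)
      = line.countP (pvHit rest pa) + (if pa p then line.count q else 0) := by
  induction line with
  | nil => simp
  | cons x t ih =>
    by_cases hx : x = q
    · subst hx
      rw [List.countP_cons, List.countP_cons, pvHit_cons, pvHit_of_not_mem rest pa x hq,
        List.count_cons_self, ih]
      by_cases hp : pa p <;> simp [hp] <;> omega
    · rw [List.countP_cons, List.countP_cons, pvHit_cons, List.count_cons_of_ne (by simpa using hx), ih]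
      have : ¬ q = x := fun h => hx h.symm
      simp [this]
      omega

theorem bool_parity_add (a b : Nat) : ((a + b) % 2 == 1) = xor (a % 2 == 1) (b % 2 == 1) := by
  rcases Nat.mod_two_eq_zero_or_one a with h | h <;>
    rcases Nat.mod_two_eq_zero_or_one b with h' | h' <;>
      simp [Nat.add_mod, h, h']

theorem pvPar_cons (q : Int) (p : String) (rest : List (Int × String)) (pa : String → Bool)
    (line : List Int) (hq : q ∉ rest.map Prod.fst) :
    pvPar ((q, p) :: rest) pa line
      = xor (pa p && (line.count q % 2 == 1)) (pvPar rest pa line) := by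
  unfold pvPar
  rw [countP_hit_cons q p rest pa line hq, bool_parity_add]
  by_cases hp : pa p <;> simp [hp, Bool.xor_comm]

theorem toggle_zipWith (zp : List Bool) (zs : List (List Int)) (q : Int) (g : List Int → Bool) :
    List.zipWith (fun b l => xor b (g l)) (pvToggle q zp zs) zs
      = List.zipWith (fun b l => xor b (xor (l.count q % 2 == 1) (g l))) zp zs := by
  induction zp generalizing zs with
  | nil => simp [pvToggle]
  | cons b t ih =>
    cases zs with
    | nil => simp [pvToggle]
    | cons l ls =>
      simp only [pvToggle, List.zip_cons_cons, List.map_cons, List.zipWith_cons_cons]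
      refine congrArg₂ List.cons (Bool.xor_assoc b _ _) ?_
      simpa only [pvToggle] using ih ls

theorem length_toggle (q : Int) (zp : List Bool) (zs : List (List Int)) (h : zp.length = zs.length) :
    (pvToggle q zp zs).length = zs.length := by
  simp [pvToggle, h]

theorem zipWith_left_of_length_eq {α β : Type} (zp : List α) (zs : List β)
    (h : zp.length = zs.length) : List.zipWith (fun b _ => b) zp zs = zp := by
  induction zp generalizing zs with
  | nil => simp
  | cons b t ih =>
    cases zs with
    | nil => simp at h
    | cons l ls => simp only [List.zipWith_cons_cons]; rw [ih ls (by simpa using h)]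

-- the main invariant of B's single pass
theorem fold_invariant (es : List (Int × String)) (zs xs : List (List Int))
    (zp xp : List Bool) (hz : zp.length = zs.length) (hx : xp.length = xs.length)
    (hnd : (es.map Prod.fst).Nodup) :
    es.foldl (fun (st : List Bool × List Bool) e =>
      let zp' := if e.2 == "X" || e.2 == "Y" then pvToggle e.1 st.1 zs else st.1
      let xp' := if e.2 == "Z" || e.2 == "Y" then pvToggle e.1 st.2 xs else st.2
      (zp', xp')) (zp, xp)
    = (List.zipWith (fun b l => xor b (pvPar es (fun p => p == "X" || p == "Y") l)) zp zs,
       List.zipWith (fun b l => xor b (pvPar es (fun p => p == "Z" || p == "Y") l)) xp xs) := by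
  induction es generalizing zp xp with
  | nil =>
    have hf : ∀ (pa : String → Bool) (l : List Int), pvPar [] pa l = false := by
      intro pa l
      unfold pvPar
      rw [List.countP_eq_zero.mpr (fun q _ => by simp [pvHit, List.lookup])]
      rfl
    simp only [List.foldl_nil, hf, Bool.xor_false]
    rw [zipWith_left_of_length_eq zp zs hz, zipWith_left_of_length_eq xp xs hx]
  | cons e rest ih =>
    obtain ⟨q, p⟩ := e
    simp only [List.map_cons, List.nodup_cons] at hnd
    obtain ⟨hq, hnd'⟩ := hnd
    simp only [List.foldl_cons]
    rw [ih _ _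
      (by by_cases h : (p == "X" || p == "Y") = true <;> simp [h, length_toggle _ _ _ hz, hz])
      (by by_cases h : (p == "Z" || p == "Y") = true <;> simp [h, length_toggle _ _ _ hx, hx])
      hnd']
    have hparz : ∀ l, pvPar ((q, p) :: rest) (fun s => s == "X" || s == "Y") l
        = xor ((p == "X" || p == "Y") && (l.count q % 2 == 1))
              (pvPar rest (fun s => s == "X" || s == "Y") l) :=
      fun l => pvPar_cons q p rest _ l hq
    have hparx : ∀ l, pvPar ((q, p) :: rest) (fun s => s == "Z" || s == "Y") l
        = xor ((p == "Z" || p == "Y") && (l.count q % 2 == 1))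
              (pvPar rest (fun s => s == "Z" || s == "Y") l) :=
      fun l => pvPar_cons q p rest _ l hq
    simp only [hparz, hparx]
    refine congrArg₂ Prod.mk ?_ ?_
    · rcases Bool.eq_false_or_eq_true (p == "X" || p == "Y") with h | h <;>
        rw [h] <;> simp [toggle_zipWith]
    · rcases Bool.eq_false_or_eq_true (p == "Z" || p == "Y") with h | h <;>
        rw [h] <;> simp [toggle_zipWith]

theorem zipWith_replicate_false (f : List Int → Bool) (zs : List (List Int)) :
    List.zipWith (fun b l => xor b (f l)) (List.replicate zs.length false) zs = zs.map f := by
  induction zs with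
  | nil => rfl
  | cons l ls ih => simp [List.replicate_succ, ih]

-- A's per-family fold counts the lines with odd crossing parity
theorem countA_eq (es : List (Int × String)) (pa : String → Bool) (lines : List (List Int)) :
    lines.foldl (fun acc line =>
      let cr := line.foldl (fun c q => if pvHit es pa q then c + 1 else c) (0 : Int)
      if PySem.Int.mod cr 2 ≠ 0 then acc + 1 else acc) (0 : Int)
    = ((lines.countP (pvPar es pa) : Nat) : Int) := by
  have hinner : ∀ line : List Int,
      line.foldl (fun c q => if pvHit es pa q then c + 1 else c) (0 : Int)
        = ((line.countP (pvHit es pa) : Nat) : Int) := by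
    intro line
    rw [PySem.List.foldl_if_add_one]
    simp
  have hm : ∀ n : Nat, PySem.Int.mod (n : Int) 2 = ((n % 2 : Nat) : Int) := fun n => by
    exact_mod_cast PySem.Int.mod_natCast n 2
  have hstep : ∀ (acc : Int) (line : List Int),
      (if PySem.Int.mod (((line.countP (pvHit es pa) : Nat) : Int)) 2 ≠ 0 then acc + 1 else acc)
        = (if pvPar es pa line then acc + 1 else acc) := by
    intro acc line
    unfold pvPar
    rw [hm]
    rcases Nat.mod_two_eq_zero_or_one (line.countP (pvHit es pa)) with h | h <;> simp [h]
  simp only [hinner, hstep]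
  rw [PySem.List.foldl_if_add_one]
  simp

-- ===== VERDICT (by name: the statement is the Claim_ definition above) =====
theorem count_logical_errors_spec : Claim_equal_count_logical_errors := by
  intro es zs xs _ hpre
  unfold Spec_count_logical_errors count_logical_errors count_logical_errors_alt
  rw [fold_invariant es zs xs _ _ (by simp) (by simp) hpre]
  simp only
  rw [zipWith_replicate_false, zipWith_replicate_false, countA_eq, countA_eq]
  simp only [Prod.mk.injEq]
  constructor <;> · simp [List.count_eq_countP, List.countP_map, Function.comp_def]
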